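-- pv_equiv track=rewrite | github.com/hojoungjang/programming-exercises | 2212-센서/solution.py | solution
-- ===== SOURCE A (Python) =====
-- def solution(sensors, k):
--     sensors.sort()
--     connections = sorted([(sensors[i] - sensors[i-1], i-1, i) for i in range(1, len(sensors))])
--     active_conn = set((i, j) for dist, i, j in connections[:(len(connections) - (k - 1))])
--
--     total = 0
--     start = sensors[0]
--     end = sensors[0]
--     for i in range(1, len(sensors)):
--         if (i-1, i) not in active_conn:
--             total += end - start
--             start = sensors[i]
--             end = sensors[i]
--         else:
--             end = sensors[i]
--
--     if start != end:
--         total += end - start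
--
--     return total
-- ===== SOURCE B (Python) =====
-- def solution(sensors, k):
--     sensors.sort()
--     n = len(sensors)
--     gaps = sorted(sensors[i] - sensors[i - 1] for i in range(1, n))
--     cut = n - k
--     return (sensors[-1] - sensors[0]) - sum(gaps[cut:])
-- ===== Notes on version B (the rewrite author's own statement) =====
-- stated objective: simpler
-- what changed: Replaces A's set of kept connections and the segment-reconstruction loop by a telescoped closed form: full span minus the sum of the k-1 largest sorted gaps (a slice sum).
import Mathlib
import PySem

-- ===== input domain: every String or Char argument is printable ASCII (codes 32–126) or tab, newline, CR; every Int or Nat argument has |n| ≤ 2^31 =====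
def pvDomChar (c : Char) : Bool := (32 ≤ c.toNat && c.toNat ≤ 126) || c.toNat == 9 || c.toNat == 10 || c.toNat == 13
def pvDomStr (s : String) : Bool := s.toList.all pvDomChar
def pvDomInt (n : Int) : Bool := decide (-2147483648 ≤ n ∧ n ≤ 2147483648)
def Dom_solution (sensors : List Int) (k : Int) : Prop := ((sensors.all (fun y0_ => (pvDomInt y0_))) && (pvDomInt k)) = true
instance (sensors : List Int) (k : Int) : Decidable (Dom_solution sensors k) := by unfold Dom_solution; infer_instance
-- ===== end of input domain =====

-- B replaces A's kept-connection set and segment-reconstruction loop by a closed form: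
-- full span minus the sum of the removed largest sorted gaps (same O(n log n) cost).
-- Both A and B sort the 'sensors' list in place; the equivalence proved here is about
-- the return value (the in-place sort mutation is identical in A and B anyway).

-- ===== PORT A =====
-- Python sorts the triples (dist, i-1, i) lexicographically; ported with the lex
-- key (dist, i-1) — exact, since the second components are pairwise distinct, so
-- the third component is never consulted.
def solution (sensors : List Int) (k : Int) : Int :=
  let s := PySem.List.sorted sensors (fun x => x) false
  let conns := PySem.List.sorted
      ((PySem.List.pyRange 1 (s.length : Int) 1).map
        (fun i => (PySem.List.pyGetD s i 0 - PySem.List.pyGetD s (i-1) 0, i-1, i)))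
      (fun t => toLex (t.1, t.2.1)) false
  let active : PySem.Set (Int × Int) :=
    PySem.Set.ofList
      ((PySem.List.slice conns none (some ((conns.length : Int) - (k - 1)))).map
        (fun t => (t.2.1, t.2.2)))
  let st := (PySem.List.pyRange 1 (s.length : Int) 1).foldl
      (fun (st : Int × Int × Int) i =>
        if (i - 1, i) ∉ active then
          (st.1 + st.2.2 - st.2.1, PySem.List.pyGetD s i 0, PySem.List.pyGetD s i 0)
        else
          (st.1, st.2.1, PySem.List.pyGetD s i 0))
      (0, PySem.List.pyGetD s 0 0, PySem.List.pyGetD s 0 0)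
  if st.2.1 ≠ st.2.2 then st.1 + st.2.2 - st.2.1 else st.1

def solution_alt (sensors : List Int) (k : Int) : Int :=
  let s := PySem.List.sorted sensors (fun x => x) false
  let n : Int := (s.length : Int)
  let gaps := PySem.List.sorted
      ((PySem.List.pyRange 1 n 1).map
        (fun i => PySem.List.pyGetD s i 0 - PySem.List.pyGetD s (i-1) 0))
      (fun x => x) false
  let cut := n - k
  (PySem.List.pyGetD s (-1) 0 - PySem.List.pyGetD s 0 0) -
    (PySem.List.slice gaps (some cut) none).sum

-- ===== PRECONDITION & SPEC =====
-- Pre_ excludes only the empty sensor list, on which A raises IndexError (sensors[0]);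
-- B raises there too.
def Pre_solution (sensors : List Int) (k : Int) : Prop := sensors ≠ []
instance (sensors : List Int) (k : Int) : Decidable (Pre_solution sensors k) := by unfold Pre_solution; infer_instance
def pvWitness_solution : List Int × Int := ([1, 5, 2], 2)
def Spec_solution (sensors : List Int) (k : Int) (out : Int) : Prop := out = solution_alt sensors k
instance (sensors : List Int) (k : Int) (out : Int) : Decidable (Spec_solution sensors k out) := by unfold Spec_solution; infer_instance

-- ===== CLAIM (what is proved, stated in full; the proofs are below) =====
def Claim_equal_solution : Prop := ∀ (sensors : List Int) (k : Int), Dom_solution sensors k → Pre_solution sensors k → Spec_solution sensors k (solution sensors k)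

-- ===== LEMMAS AND PROOFS =====

-- the gap ending at index i of the sorted list, and A's loop body (parametrised
-- by the membership list of the active set)
def pvGap (s : List Int) (i : Int) : Int :=
  PySem.List.pyGetD s i 0 - PySem.List.pyGetD s (i-1) 0

def pvStep (s : List Int) (act : List (Int × Int)) (st : Int × Int × Int) (i : Int) :
    Int × Int × Int :=
  if (i - 1, i) ∉ act then
    (st.1 + st.2.2 - st.2.1, PySem.List.pyGetD s i 0, PySem.List.pyGetD s i 0)
  else
    (st.1, st.2.1, PySem.List.pyGetD s i 0)

theorem pvLoop (s : List Int) (act : List (Int × Int)) (j : Nat) :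
    ((PySem.List.pyRange 1 (1 + (j : Int)) 1).foldl (pvStep s act)
        (0, PySem.List.pyGetD s 0 0, PySem.List.pyGetD s 0 0)).1
      + ((PySem.List.pyRange 1 (1 + (j : Int)) 1).foldl (pvStep s act)
        (0, PySem.List.pyGetD s 0 0, PySem.List.pyGetD s 0 0)).2.2
      - ((PySem.List.pyRange 1 (1 + (j : Int)) 1).foldl (pvStep s act)
        (0, PySem.List.pyGetD s 0 0, PySem.List.pyGetD s 0 0)).2.1
      = ((PySem.List.pyRange 1 (1 + (j : Int)) 1).map
          (fun i => if (i - 1, i) ∈ act then pvGap s i else 0)).sum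
    ∧ ((PySem.List.pyRange 1 (1 + (j : Int)) 1).foldl (pvStep s act)
        (0, PySem.List.pyGetD s 0 0, PySem.List.pyGetD s 0 0)).2.2
      = PySem.List.pyGetD s (j : Int) 0 := by
  induction j with
  | zero => simp [PySem.List.pyRange_one_eq_nil]
  | succ j ih =>
    have hsplit : PySem.List.pyRange 1 (1 + ((j+1 : Nat) : Int)) 1
        = PySem.List.pyRange 1 (1 + (j : Int)) 1 ++ [1 + (j : Int)] := by
      have := PySem.List.pyRange_one_succ_right (a := 1) (b := 1 + (j : Int)) (by omega)
      push_cast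
      rw [show (1 : Int) + ((j : Int) + 1) = (1 + (j : Int)) + 1 by ring, this]
    rw [hsplit, List.foldl_append, List.map_append, List.sum_append]
    obtain ⟨ih1, ih2⟩ := ih
    set st := (PySem.List.pyRange 1 (1 + (j : Int)) 1).foldl (pvStep s act)
        (0, PySem.List.pyGetD s 0 0, PySem.List.pyGetD s 0 0) with hst
    have h1 : (1 : Int) + (j : Int) - 1 = (j : Int) := by ring
    have hcast : (((j+1 : Nat)) : Int) = 1 + (j : Int) := by push_cast; ring
    rw [hcast]
    simp only [List.foldl_cons, List.foldl_nil, List.map_cons, List.map_nil, List.sum_cons,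
      List.sum_nil, pvStep, pvGap, h1]
    by_cases hmem : ((j : Int), 1 + (j : Int)) ∈ act
    · simp only [hmem, not_true_eq_false, if_false, if_true]
      exact ⟨by simp only [pvGap] at ih1; linarith [ih1, ih2], by trivial⟩
    · simp only [hmem, not_false_eq_true, if_true, if_false]
      exact ⟨by simp only [pvGap] at ih1; linarith [ih1, ih2], by trivial⟩

theorem pvTelescope (s : List Int) (j : Nat) :
    ((PySem.List.pyRange 1 (1 + (j : Int)) 1).map (fun i => pvGap s i)).sum
      = PySem.List.pyGetD s (j : Int) 0 - PySem.List.pyGetD s 0 0 := by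
  induction j with
  | zero => simp [PySem.List.pyRange_one_eq_nil]
  | succ j ih =>
    have hcast : (((j+1 : Nat)) : Int) = 1 + (j : Int) := by push_cast; ring
    have hsplit : PySem.List.pyRange 1 (1 + ((j+1 : Nat) : Int)) 1
        = PySem.List.pyRange 1 (1 + (j : Int)) 1 ++ [1 + (j : Int)] := by
      have := PySem.List.pyRange_one_succ_right (a := 1) (b := 1 + (j : Int)) (by omega)
      rw [hcast, show (1 : Int) + (1 + (j : Int)) = (1 + (j : Int)) + 1 by ring, this]
    rw [hsplit, List.map_append, List.sum_append, ih, hcast]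
    simp only [List.map_cons, List.map_nil, List.sum_cons, List.sum_nil, pvGap]
    have h1 : (1 : Int) + (j : Int) - 1 = (j : Int) := by ring
    rw [h1]; ring

theorem pvMain (sensors : List Int) (k : Int) (hpre : sensors ≠ []) :
    solution sensors k = solution_alt sensors k := by
  simp only [solution, solution_alt]
  set s := PySem.List.sorted sensors (fun x => x) false with hsdef
  have hs : s ≠ [] := by
    rw [hsdef, Ne, PySem.List.sorted_eq_nil_iff]; exact hpre
  have hlen : 1 ≤ s.length := List.length_pos_of_ne_nil hs
  set n : Int := (s.length : Int) with hndef
  set f : Int → Int × Int × Int :=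
    (fun i => (PySem.List.pyGetD s i 0 - PySem.List.pyGetD s (i-1) 0, i-1, i)) with hfdef
  set T := (PySem.List.pyRange 1 n 1).map f with hTdef
  set conns := PySem.List.sorted T (fun t => toLex (t.1, t.2.1)) false with hcdef
  set S := PySem.List.slice conns none (some ((conns.length : Int) - (k - 1))) with hSdef
  set gaps := PySem.List.sorted
      ((PySem.List.pyRange 1 n 1).map
        (fun i => PySem.List.pyGetD s i 0 - PySem.List.pyGetD s (i-1) 0))
      (fun x => x) false with hgdef
  set act := PySem.Set.ofList (List.map (fun t => (t.2.1, t.2.2)) S) with hadef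
  have hstep : (fun (st : Int × Int × Int) i =>
      if (i - 1, i) ∉ act then
        (st.1 + st.2.2 - st.2.1, PySem.List.pyGetD s i 0, PySem.List.pyGetD s i 0)
      else (st.1, st.2.1, PySem.List.pyGetD s i 0)) = pvStep s act := rfl
  rw [hstep]
  have hn1 : n = 1 + ((s.length - 1 : Nat) : Int) := by rw [hndef]; omega
  rw [hn1]
  obtain ⟨hinv, -⟩ := pvLoop s act (s.length - 1)
  set st := (PySem.List.pyRange 1 (1 + ((s.length - 1 : Nat) : Int)) 1).foldl (pvStep s act)
      (0, PySem.List.pyGetD s 0 0, PySem.List.pyGetD s 0 0) with hstdef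
  have hA : (if st.2.1 ≠ st.2.2 then st.1 + st.2.2 - st.2.1 else st.1)
      = st.1 + st.2.2 - st.2.1 := by
    by_cases h : st.2.1 = st.2.2 <;> simp [h]
  rw [hA, hinv, ← hn1]
  -- indicator congruence: membership in the active set ⇔ the triple is in the slice
  have hind : List.map (fun i => if (i - 1, i) ∈ act then pvGap s i else 0)
        (PySem.List.pyRange 1 n 1)
      = List.map ((fun t : Int × Int × Int => if t ∈ S then t.1 else 0) ∘ f)
        (PySem.List.pyRange 1 n 1) := by
    apply List.map_congr_left
    intro i _
    have hiff : ((i - 1, i) ∈ act) ↔ f i ∈ S := by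
      rw [hadef]
      constructor
      · intro h
        have h2 : (i - 1, i) ∈ List.map (fun t : Int × Int × Int => (t.2.1, t.2.2)) S := by
          rwa [PySem.Set.mem_ofList] at h
        obtain ⟨t, htS, hpair⟩ := List.mem_map.mp h2
        have htT : t ∈ T := by
          rw [hTdef, ← PySem.List.mem_sorted (key := fun t : Int × Int × Int => toLex (t.1, t.2.1)) (rev := false), ← hcdef]
          have htS' := htS
          rw [hSdef] at htS'
          exact PySem.List.mem_of_mem_slice _ _ _ htS'
        obtain ⟨jx, _, hfj⟩ := List.mem_map.mp (hTdef ▸ htT)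
        have h22 : t.2.2 = i := congrArg Prod.snd hpair
        have hjxi : jx = i := by rw [← hfj] at h22; exact h22
        rw [hjxi] at hfj
        exact hfj ▸ htS
      · intro h
        rw [PySem.Set.mem_ofList]
        exact List.mem_map.mpr ⟨f i, h, rfl⟩
    exact if_congr hiff rfl rfl
  rw [hind, ← List.map_map, ← hTdef]
  set w : Int × Int × Int → Int := (fun t => if t ∈ S then t.1 else 0) with hwdef
  have hperm : conns.Perm T := by rw [hcdef]; exact PySem.List.sorted_perm ..
  have hTnodup : T.Nodup := by
    rw [hTdef]
    refine List.Nodup.map ?_ (PySem.List.nodup_pyRange_one 1 n)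
    intro a b hab
    exact congrArg (fun t : Int × Int × Int => t.2.2) hab
  have hcnodup : conns.Nodup := (hperm.nodup_iff).mpr hTnodup
  have hsum1 : (List.map w T).sum = (List.map w conns).sum := ((hperm.map w).sum_eq).symm
  have hlc : conns.length = s.length - 1 := by
    rw [hcdef, PySem.List.length_sorted, hTdef, List.length_map, PySem.List.length_pyRange_one]
    omega
  have hlg : gaps.length = s.length - 1 := by
    rw [hgdef, PySem.List.length_sorted, List.length_map, PySem.List.length_pyRange_one]
    omega
  have hbnd : ((conns.length : Int) - (k - 1)) = n - k := by rw [hlc]; omega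
  obtain ⟨c, hS2, hB2⟩ : ∃ c : Nat, S = conns.take c ∧
      PySem.List.slice gaps (some (n - k)) none = gaps.drop c := by
    by_cases hc : 0 ≤ n - k
    · exact ⟨(n - k).toNat, by rw [hSdef, hbnd, PySem.List.slice_to _ hc],
        by rw [PySem.List.slice_from _ hc]⟩
    · have hm : 0 < (k - n).toNat := by omega
      have hnk : n - k = -(((k - n).toNat : Int)) := by omega
      refine ⟨conns.length - (k - n).toNat, ?_, ?_⟩
      · rw [hSdef, hbnd, hnk, PySem.List.slice_to_neg_natCast _ _ hm]
      · rw [hnk, PySem.List.slice_from_neg_natCast _ _ hm,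
          show gaps.length = conns.length by rw [hlg, hlc]]
  have hsum2 : (List.map w conns).sum
      = ((conns.take c).map w).sum + ((conns.drop c).map w).sum := by
    conv_lhs => rw [← List.take_append_drop c conns]
    rw [List.map_append, List.sum_append]
  have htake : ((conns.take c).map w).sum = ((conns.map (fun t => t.1)).take c).sum := by
    rw [← List.map_take]
    apply congrArg
    apply List.map_congr_left
    intro t ht
    rw [hwdef]
    exact if_pos (hS2 ▸ ht)
  have hdrop : ((conns.drop c).map w).sum = 0 := by
    apply List.sum_eq_zero
    intro x hx
    obtain ⟨t, ht, rfl⟩ := List.mem_map.mp hx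
    have hnotin : t ∉ S := by
      rw [hS2]
      exact fun hcon => (List.disjoint_take_drop hcnodup le_rfl) hcon ht
    rw [hwdef]
    exact if_neg hnotin
  have hgeq : gaps = conns.map (fun t : Int × Int × Int => t.1) := by
    rw [hgdef]
    apply PySem.List.sorted_id_eq_of_perm_of_pairwise
    · have hTm : T.map (fun t : Int × Int × Int => t.1)
          = (PySem.List.pyRange 1 n 1).map
              (fun i => PySem.List.pyGetD s i 0 - PySem.List.pyGetD s (i-1) 0) := by
        rw [hTdef, List.map_map]; rfl
      exact hTm ▸ (hperm.map _)
    · have hpw := PySem.List.sorted_pairwise (xs := T)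
        (key := fun t : Int × Int × Int => toLex (t.1, t.2.1))
      rw [← hcdef] at hpw
      rw [List.pairwise_map]
      refine hpw.imp ?_
      intro a b h
      rw [Prod.Lex.le_iff] at h
      rcases h with h | h
      · exact le_of_lt h
      · exact le_of_eq h.1
  have hneg : PySem.List.pyGetD s (-1) 0 = PySem.List.pyGetD s ((s.length - 1 : Nat) : Int) 0 := by
    rw [PySem.List.pyGetD_neg_one (h := hs), PySem.List.pyGetD_natCast,
      List.getLast_eq_getElem, List.getD_eq_getElem _ _ (by omega)]
  have hspan : PySem.List.pyGetD s (-1) 0 - PySem.List.pyGetD s 0 0 = gaps.sum := by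
    have hgs : gaps.sum = ((PySem.List.pyRange 1 n 1).map (fun i => pvGap s i)).sum := by
      rw [hgdef]
      exact (PySem.List.sorted_perm ..).sum_eq
    rw [hgs, hn1, pvTelescope s (s.length - 1), hneg]
  have hgsum : gaps.sum = (gaps.take c).sum + (gaps.drop c).sum := by
    conv_lhs => rw [← List.take_append_drop c gaps]
    rw [List.sum_append]
  rw [hsum1, hsum2, htake, hdrop, hB2, hspan]
  rw [hgeq] at hgsum ⊢
  linarith [hgsum]

-- ===== VERDICT (by name: the statement is the Claim_ definition above) =====
theorem solution_spec : Claim_equal_solution := by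
  intro sensors k _ hpre
  unfold Spec_solution
  exact pvMain sensors k hpre
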